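-- pv_equiv track=rewrite | github.com/IronLanguages/main | Languages/Ruby/Tests/legacy2/Compat/gen_assignment_long.py | left_generator
-- ===== SOURCE A (Python) =====
-- def left_generator(depth):
--     if depth > 4: return
--
--     for x in ["A", "(A,)", "(*A)", "*A"]:
--         yield x
--
--     #for x in left_generator(depth + 1):
--     #   yield "*(A, %s)" % x
--
--     for x in left_generator(depth + 1):
--         yield "A, %s" % x
--
--     for x in left_generator(depth + 1):
--         yield "(A, %s)" % x
-- ===== SOURCE B (Python) =====
-- def left_generator(depth):
--     if depth > 4:
--         return
--     base = ["A", "(A,)", "(*A)", "*A"]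
--     result = []
--     d = 4
--     while d >= depth:
--         result = base + ["A, %s" % x for x in result] + ["(A, %s)" % x for x in result]
--         d -= 1
--     yield from result
-- ===== Notes on version B (the rewrite author's own statement) =====
-- stated objective: alternative
-- what changed: Replaces the top-down recursive generator by a bottom-up iterative tabulation: one loop from the deepest level up to the argument folds the recurrence result = base + ['A, %s' per x in result] + ['(A, %s)' per x in result], then yields the finished list.
import Mathlib
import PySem

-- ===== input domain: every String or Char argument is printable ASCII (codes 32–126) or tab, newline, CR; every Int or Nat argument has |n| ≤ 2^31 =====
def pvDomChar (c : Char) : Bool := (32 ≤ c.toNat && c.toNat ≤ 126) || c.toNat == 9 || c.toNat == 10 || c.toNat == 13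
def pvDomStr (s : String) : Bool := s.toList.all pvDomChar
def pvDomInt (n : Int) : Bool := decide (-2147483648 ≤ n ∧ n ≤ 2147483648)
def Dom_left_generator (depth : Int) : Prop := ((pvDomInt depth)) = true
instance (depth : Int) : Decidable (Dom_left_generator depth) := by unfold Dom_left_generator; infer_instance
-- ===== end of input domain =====

-- B: bottom-up iterative tabulation of A's recurrence instead of top-down recursion (alternative decomposition, same cost).
-- ===== PORT A =====
def left_generator (depth : Int) : List String :=
  if depth > 4 then []
  else
    ["A", "(A,)", "(*A)", "*A"]
      ++ (left_generator (depth + 1)).map (fun x => "A, " ++ x)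
      ++ (left_generator (depth + 1)).map (fun x => "(A, " ++ x ++ ")")
termination_by (5 - depth).toNat
decreasing_by omega

-- ===== PORT B =====
def pvStep (result : List String) : List String :=
  ["A", "(A,)", "(*A)", "*A"]
    ++ result.map (fun x => "A, " ++ x)
    ++ result.map (fun x => "(A, " ++ x ++ ")")

def left_generator_alt (depth : Int) : List String :=
  if depth > 4 then []
  else (List.range (5 - depth).toNat).foldl (fun result _ => pvStep result) []

-- ===== PRECONDITION & SPEC =====
def Spec_left_generator (depth : Int) (out : List String) : Prop := out = left_generator_alt depth
instance (depth : Int) (out : List String) : Decidable (Spec_left_generator depth out) := by unfold Spec_left_generator; infer_instance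

-- ===== CLAIM (what is proved, stated in full; the proofs are below) =====
def Claim_equal_left_generator : Prop := ∀ (depth : Int), Dom_left_generator depth → Spec_left_generator depth (left_generator depth)

-- ===== LEMMAS AND PROOFS =====

-- ===== VERDICT (by name: the statement is the Claim_ definition above) =====
theorem pv_foldl_range_const {α : Type} (f : α → α) (init : α) (n : Nat) :
    (List.range n).foldl (fun r _ => f r) init = f^[n] init := by
  induction n with
  | zero => simp
  | succ n ih => rw [List.range_succ, List.foldl_append, ih, Function.iterate_succ_apply']; rfl

theorem pv_left_iterate : ∀ (n : Nat) (depth : Int), (5 - depth).toNat = n →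
    left_generator depth = pvStep^[n] [] := by
  intro n
  induction n with
  | zero =>
    intro depth h
    have hd : depth > 4 := by omega
    rw [left_generator]
    simp [hd]
  | succ n ih =>
    intro depth h
    have hd : ¬ depth > 4 := by omega
    rw [left_generator]
    simp only [hd, if_false]
    rw [ih (depth + 1) (by omega), Function.iterate_succ_apply']
    rfl

theorem left_generator_spec : Claim_equal_left_generator := by
  intro depth _
  unfold Spec_left_generator left_generator_alt
  by_cases hd : depth > 4
  · simp only [hd, if_true]
    rw [left_generator]; simp [hd]
  · simp only [hd, if_false]
    rw [pv_foldl_range_const, pv_left_iterate (5 - depth).toNat depth rfl]
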